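-- pv_equiv track=rewrite | github.com/m-s-ahmed/CryptoLab | Final_Me/Rsa_py.py | possible_e
-- ===== SOURCE A (Python) =====
-- def gcd(a,b):
--     while b!=0:
--         a,b=b,a%b
--     return a
--
-- def possible_e(phi,limit=15):
--     e_list=[]
--     for e in range(2,phi):
--         if gcd(e,phi)==1:
--             e_list.append(e)
--             if len(e_list)==limit:
--                 break
--     return e_list
-- ===== SOURCE B (Python) =====
-- def possible_e(phi, limit=15):
--     # Factor phi once into its distinct prime factors by trial division,
--     # then test each candidate e by divisibility instead of a per-candidate gcd.
--     n = phi
--     primes = []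
--     d = 2
--     while d * d <= n:
--         if n % d == 0:
--             primes.append(d)
--             while n % d == 0:
--                 n //= d
--         d += 1
--     if n > 1:
--         primes.append(n)
--     e_list = []
--     for e in range(2, phi):
--         for p in primes:
--             if e % p == 0:
--                 break
--         else:
--             e_list.append(e)
--             if len(e_list) == limit:
--                 break
--     return e_list
-- ===== Notes on version B (the rewrite author's own statement) =====
-- stated objective: faster
-- what changed: B factors phi once into its distinct prime factors by trial division and tests each candidate e by divisibility against that factor table, replacing A's per-candidate Euclidean gcd computation.
import Mathlib
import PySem

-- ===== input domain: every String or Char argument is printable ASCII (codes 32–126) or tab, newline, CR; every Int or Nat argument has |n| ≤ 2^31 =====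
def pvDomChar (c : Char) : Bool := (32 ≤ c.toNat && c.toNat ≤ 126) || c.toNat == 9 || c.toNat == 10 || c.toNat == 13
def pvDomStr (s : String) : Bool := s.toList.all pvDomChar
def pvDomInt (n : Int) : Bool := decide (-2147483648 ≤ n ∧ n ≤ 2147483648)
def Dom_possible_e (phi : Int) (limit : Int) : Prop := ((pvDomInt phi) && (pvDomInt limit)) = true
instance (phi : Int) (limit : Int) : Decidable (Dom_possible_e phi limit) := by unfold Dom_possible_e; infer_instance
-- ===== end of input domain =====

-- B replaces A's per-candidate Euclidean gcd by a one-time trial-division factorization of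
-- phi into its distinct prime factors followed by plain divisibility tests (objective: faster).

-- ===== PORT A =====

-- termination lemma for the Euclidean loop: Python's a % b shrinks in absolute value
theorem pvNatAbs_pymod_lt (a b : Int) (h : b ≠ 0) : (PySem.Int.mod a b).natAbs < b.natAbs := by
  show (a.fmod b).natAbs < b.natAbs
  have h1 : 0 ≤ a % b := Int.emod_nonneg a h
  have h2 : a % b < b.natAbs := Int.emod_lt a h
  rw [Int.fmod_eq_emod]
  split
  · omega
  · rename_i hh
    have : a % b ≠ 0 := fun h0 => hh (Or.inr (Int.dvd_of_emod_eq_zero h0))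
    omega

-- def gcd(a,b): while b!=0: a,b=b,a%b; return a
def pyGcd (a b : Int) : Int :=
  if h : b ≠ 0 then pyGcd b (PySem.Int.mod a b) else a
termination_by b.natAbs
decreasing_by exact pvNatAbs_pymod_lt a b h

-- the 'for e in range(2,phi)' loop of A, with its break on len(e_list)==limit
def aLoop (phi limit : Int) : List Int → List Int → List Int
  | [], acc => acc
  | e :: rest, acc =>
    if pyGcd e phi = 1 then
      if ((acc ++ [e]).length : Int) = limit then acc ++ [e]
      else aLoop phi limit rest (acc ++ [e])
    else aLoop phi limit rest acc

def possible_e (phi : Int) (limit : Int) : List Int :=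
  aLoop phi limit (PySem.List.pyRange 2 phi 1) []

-- ===== PORT B =====

-- inner 'while n % d == 0: n //= d'; the guard 1 < d ∧ 0 < n only makes the loop total
-- (it always holds when reached from possible_e_alt)
def stripB (d n : Int) : Int :=
  if h : 1 < d ∧ 0 < n ∧ PySem.Int.mod n d = 0 then stripB d (PySem.Int.floordiv n d) else n
termination_by n.toNat
decreasing_by
  have hd : PySem.Int.floordiv n d = n / d := PySem.Int.floordiv_eq_ediv_of_pos (by omega)
  have h1 : n / d < n := by
    rw [Int.ediv_lt_iff_lt_mul (by omega : (0:Int) < d)]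
    nlinarith [h.2.1, h.1]
  have h2 : 0 ≤ n / d := Int.ediv_nonneg (by omega) (by omega)
  rw [hd]; omega

-- termination lemma for the outer factor loop: stripping never enlarges n
theorem stripB_le (d n : Int) : stripB d n ≤ n := by
  induction n using stripB.induct (d := d) with
  | case1 n h ih =>
    rw [stripB, dif_pos h]
    have hd : PySem.Int.floordiv n d = n / d := PySem.Int.floordiv_eq_ediv_of_pos (by omega)
    have h1 : n / d ≤ n := Int.ediv_le_self d (by omega)
    rw [hd] at ih ⊢; omega
  | case2 n h => rw [stripB, dif_neg h]

-- outer 'while d*d <= n' loop; returns (primes so far, remaining n); guard 2 ≤ d makes it total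
def facB (d n : Int) (acc : List Int) : List Int × Int :=
  if h : 2 ≤ d ∧ d * d ≤ n then
    if PySem.Int.mod n d = 0 then facB (d + 1) (stripB d n) (acc ++ [d])
    else facB (d + 1) n acc
  else (acc, n)
termination_by (n + 1 - d).toNat
decreasing_by
  · have h1 := stripB_le d n
    have h2 : d * 2 ≤ d * d := by
      have := mul_le_mul_of_nonneg_left h.1 (by omega : (0:Int) ≤ d); linarith
    omega
  · have h2 : d * 2 ≤ d * d := by
      have := mul_le_mul_of_nonneg_left h.1 (by omega : (0:Int) ≤ d); linarith
    omega

-- the distinct prime factors of phi (the 'primes' list right before B's candidate loop)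
def primesOf (phi : Int) : List Int :=
  let fr := facB 2 phi []
  if 1 < fr.2 then fr.1 ++ [fr.2] else fr.1

-- B's 'for e in range(2,phi)' loop: for/else divisibility test, break on len(e_list)==limit
def bLoop (limit : Int) (primes : List Int) : List Int → List Int → List Int
  | [], acc => acc
  | e :: rest, acc =>
    if primes.any (fun p => PySem.Int.mod e p == 0) then bLoop limit primes rest acc
    else
      if ((acc ++ [e]).length : Int) = limit then acc ++ [e]
      else bLoop limit primes rest (acc ++ [e])

def possible_e_alt (phi : Int) (limit : Int) : List Int :=
  bLoop limit (primesOf phi) (PySem.List.pyRange 2 phi 1) []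

-- ===== PRECONDITION & SPEC =====
def Spec_possible_e (phi : Int) (limit : Int) (out : List Int) : Prop := out = possible_e_alt phi limit
instance (phi : Int) (limit : Int) (out : List Int) : Decidable (Spec_possible_e phi limit out) := by unfold Spec_possible_e; infer_instance

-- ===== CLAIM (what is proved, stated in full; the proofs are below) =====
def Claim_equal_possible_e : Prop := ∀ (phi : Int) (limit : Int), Dom_possible_e phi limit → Spec_possible_e phi limit (possible_e phi limit)

-- ===== LEMMAS AND PROOFS =====

theorem pyGcd_eq_gcd : ∀ (k : Nat) (a b : Int), b.natAbs ≤ k → 0 ≤ a → 0 ≤ b →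
    pyGcd a b = (Int.gcd a b : Int) := by
  intro k
  induction k with
  | zero =>
    intro a b hbk ha hb0
    have hb : b = 0 := by omega
    subst hb
    rw [pyGcd, dif_neg (fun hc => hc rfl), Int.gcd_zero_right]
    exact (Int.natAbs_of_nonneg ha).symm
  | succ k ih =>
    intro a b hbk ha hb0
    by_cases hb : b = 0
    · subst hb
      rw [pyGcd, dif_neg (fun hc => hc rfl), Int.gcd_zero_right]
      exact (Int.natAbs_of_nonneg ha).symm
    · rw [pyGcd, dif_pos hb]
      have hbpos : 0 < b := by omega
      rw [PySem.Int.mod_eq_emod_of_pos hbpos]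
      have h1 : 0 ≤ a % b := Int.emod_nonneg a hb
      have h2 : a % b < b := Int.emod_lt_of_pos a hbpos
      rw [ih b (a % b) (by omega) hb0 h1]
      rw [Int.gcd_comm, Int.gcd_emod]

theorem stripB_dvd (d n : Int) : stripB d n ∣ n := by
  induction n using stripB.induct (d := d) with
  | case1 n h ih =>
    rw [stripB, dif_pos h]
    have hdn : d ∣ n := (PySem.Int.mod_eq_zero_iff_dvd n d).1 h.2.2
    have hfd : PySem.Int.floordiv n d = n / d := PySem.Int.floordiv_eq_ediv_of_pos (by omega)
    refine dvd_trans ih ?_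
    rw [hfd]
    exact ⟨d, (Int.ediv_mul_cancel hdn).symm⟩
  | case2 n h => rw [stripB, dif_neg h]

theorem stripB_pos (d n : Int) : 0 < n → 0 < stripB d n := by
  induction n using stripB.induct (d := d) with
  | case1 n h ih =>
    intro _
    rw [stripB, dif_pos h]
    have hdn : d ∣ n := (PySem.Int.mod_eq_zero_iff_dvd n d).1 h.2.2
    have hfd : PySem.Int.floordiv n d = n / d := PySem.Int.floordiv_eq_ediv_of_pos (by omega)
    apply ih
    rw [hfd]
    by_contra hle
    have h0 : n / d ≤ 0 := by omega
    have := Int.ediv_mul_cancel hdn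
    nlinarith [h.2.1, h.1]
  | case2 n h => intro hn; rw [stripB, dif_neg h]; exact hn

theorem stripB_not_dvd (d n : Int) (hd : 1 < d) : 0 < n → ¬ d ∣ stripB d n := by
  induction n using stripB.induct (d := d) with
  | case1 n h ih =>
    intro _
    rw [stripB, dif_pos h]
    apply ih
    have hdn : d ∣ n := (PySem.Int.mod_eq_zero_iff_dvd n d).1 h.2.2
    have hfd : PySem.Int.floordiv n d = n / d := PySem.Int.floordiv_eq_ediv_of_pos (by omega)
    rw [hfd]
    by_contra hle
    have h0 : n / d ≤ 0 := by omega
    have := Int.ediv_mul_cancel hdn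
    nlinarith [h.2.1, h.1]
  | case2 n h =>
    intro hn
    rw [stripB, dif_neg h]
    intro hdvd
    exact h ⟨hd, hn, (PySem.Int.mod_eq_zero_iff_dvd n d).2 hdvd⟩

theorem stripB_keep (d n q : Int) (hq : Prime q) (hnd : ¬ q ∣ d) : q ∣ n → q ∣ stripB d n := by
  induction n using stripB.induct (d := d) with
  | case1 n h ih =>
    intro hdvd
    rw [stripB, dif_pos h]
    apply ih
    have hdn : d ∣ n := (PySem.Int.mod_eq_zero_iff_dvd n d).1 h.2.2
    have hfd : PySem.Int.floordiv n d = n / d := PySem.Int.floordiv_eq_ediv_of_pos (by omega)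
    rw [hfd]
    have hmul : n / d * d = n := Int.ediv_mul_cancel hdn
    have : q ∣ n / d * d := by rw [hmul]; exact hdvd
    rcases (hq.dvd_mul.1 this) with hc | hc
    · exact hc
    · exact absurd hc hnd
  | case2 n h => intro hdvd; rw [stripB, dif_neg h]; exact hdvd

theorem facB_mono (d n : Int) (acc : List Int) (p : Int) : p ∈ acc → p ∈ (facB d n acc).1 := by
  induction d, n, acc using facB.induct with
  | case1 d n acc h hmod ih =>
    intro hp
    rw [facB, dif_pos h, if_pos hmod]
    exact ih (by simp [hp])
  | case2 d n acc h hmod ih =>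
    intro hp
    rw [facB, dif_pos h, if_neg hmod]
    exact ih hp
  | case3 d n acc h =>
    intro hp
    rw [facB, dif_neg h]
    exact hp

theorem facB_sound (d n : Int) (acc : List Int) :
    (∀ p ∈ (facB d n acc).1, p ∈ acc ∨ (2 ≤ p ∧ p ∣ n)) ∧ (facB d n acc).2 ∣ n := by
  induction d, n, acc using facB.induct with
  | case1 d n acc h hmod ih =>
    rw [facB, dif_pos h, if_pos hmod]
    have hdn : d ∣ n := (PySem.Int.mod_eq_zero_iff_dvd n d).1 hmod
    have hsd : stripB d n ∣ n := stripB_dvd d n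
    constructor
    · intro p hp
      rcases ih.1 p hp with hacc | ⟨h2, hdv⟩
      · rcases List.mem_append.1 hacc with ha | hd'
        · exact Or.inl ha
        · simp at hd'
          subst hd'
          exact Or.inr ⟨h.1, hdn⟩
      · exact Or.inr ⟨h2, dvd_trans hdv hsd⟩
    · exact dvd_trans ih.2 hsd
  | case2 d n acc h hmod ih =>
    rw [facB, dif_pos h, if_neg hmod]
    exact ih
  | case3 d n acc h =>
    rw [facB, dif_neg h]
    exact ⟨fun p hp => Or.inl hp, dvd_refl n⟩

theorem facB_complete (q : Int) (hq : Prime q) (hqpos : 0 < q) :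
    ∀ d n acc, 2 ≤ d → 0 < n → (∀ k : Int, 2 ≤ k → k < d → ¬ k ∣ n) → q ∣ n →
      q ∈ (facB d n acc).1 ∨ (q = (facB d n acc).2 ∧ 1 < (facB d n acc).2) := by
  have hq2 : 2 ≤ q := by
    have := hq.ne_one
    have h0 := hq.ne_zero
    omega
  intro d n acc
  induction d, n, acc using facB.induct with
  | case1 d n acc h hmod ih =>
    intro hd2 hn hinv hqn
    rw [facB, dif_pos h, if_pos hmod]
    have hdn : d ∣ n := (PySem.Int.mod_eq_zero_iff_dvd n d).1 hmod
    by_cases hqd : q = d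
    · left
      exact facB_mono _ _ _ _ (by simp [hqd])
    · have hnqd : ¬ q ∣ d := by
        intro hdvd
        have hqled : q ≤ d := Int.le_of_dvd (by omega) hdvd
        have : q < d := by omega
        exact hinv q hq2 this (dvd_trans hdvd hdn)
      apply ih (by omega) (stripB_pos d n hn)
      · intro k hk2 hkd hkdvd
        by_cases hkd' : k = d
        · exact stripB_not_dvd d n (by omega) hn (hkd' ▸ hkdvd)
        · exact hinv k hk2 (by omega) (dvd_trans hkdvd (stripB_dvd d n))
      · exact stripB_keep d n q hq hnqd hqn
  | case2 d n acc h hmod ih =>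
    intro hd2 hn hinv hqn
    rw [facB, dif_pos h, if_neg hmod]
    apply ih (by omega) hn
    · intro k hk2 hkd hkdvd
      by_cases hkd' : k = d
      · exact hmod ((PySem.Int.mod_eq_zero_iff_dvd n d).2 (hkd' ▸ hkdvd))
      · exact hinv k hk2 (by omega) hkdvd
    · exact hqn
  | case3 d n acc h =>
    intro hd2 hn hinv hqn
    rw [facB, dif_neg h]
    have hnd2 : n < d * d := by
      by_contra hc
      exact h ⟨hd2, by omega⟩
    have hqlen : q ≤ n := Int.le_of_dvd hn hqn
    by_cases hqeq : q = n
    · exact Or.inr ⟨hqeq, by omega⟩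
    · exfalso
      have hqltn : q < n := by omega
      set m := n / q with hm
      have hmul : m * q = n := Int.ediv_mul_cancel hqn
      have hmpos : 0 < m := by nlinarith
      have hmne1 : m ≠ 1 := by
        intro h1
        rw [h1, one_mul] at hmul
        omega
      have hm2 : 2 ≤ m := by omega
      have hmn : m ∣ n := ⟨q, hmul.symm⟩
      have hqged : d ≤ q := by
        by_contra hc
        exact hinv q hq2 (by omega) hqn
      have hmged : d ≤ m := by
        by_contra hc
        exact hinv m hm2 (by omega) hmn
      nlinarith

theorem primesOf_sound (phi : Int) (p : Int) (hp : p ∈ primesOf phi) : 2 ≤ p ∧ p ∣ phi := by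
  have hs := facB_sound 2 phi []
  unfold primesOf at hp
  by_cases h1 : 1 < (facB 2 phi []).2
  · rw [if_pos h1] at hp
    rcases List.mem_append.1 hp with hf | hl
    · rcases hs.1 p hf with hnil | hok
      · simp at hnil
      · exact hok
    · simp at hl
      subst hl
      exact ⟨by omega, hs.2⟩
  · rw [if_neg h1] at hp
    rcases hs.1 p hp with hnil | hok
    · simp at hnil
    · exact hok

theorem primesOf_complete (phi : Int) (hphi : 0 < phi) (q : Int) (hq : Prime q)
    (hqpos : 0 < q) (hdvd : q ∣ phi) : q ∈ primesOf phi := by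
  have h := facB_complete q hq hqpos 2 phi [] (le_refl 2) hphi (by intro k hk2 hkd _; omega) hdvd
  unfold primesOf
  rcases h with hf | ⟨hqeq, h1⟩
  · by_cases h1 : 1 < (facB 2 phi []).2
    · rw [if_pos h1]; exact List.mem_append.2 (Or.inl hf)
    · rw [if_neg h1]; exact hf
  · rw [if_pos h1]
    exact List.mem_append.2 (Or.inr (by simp [hqeq]))

-- the two per-candidate tests agree on every e of range(2, phi)
theorem cond_iff (phi e : Int) (he2 : 2 ≤ e) (hlt : e < phi) :
    (pyGcd e phi = 1) ↔ ¬ ((primesOf phi).any (fun p => PySem.Int.mod e p == 0) = true) := by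
  have hphi : 0 < phi := by omega
  rw [pyGcd_eq_gcd phi.natAbs e phi (le_refl _) (by omega) (by omega)]
  rw [List.any_eq_true]
  constructor
  · rintro hg ⟨p, hp, hpe⟩
    obtain ⟨hp2, hpphi⟩ := primesOf_sound phi p hp
    have hpdvde : p ∣ e := (PySem.Int.mod_eq_zero_iff_dvd e p).1 (by simpa using hpe)
    have h1 : p.natAbs ∣ Int.gcd e phi :=
      Nat.dvd_gcd (Int.natAbs_dvd_natAbs.2 hpdvde) (Int.natAbs_dvd_natAbs.2 hpphi)
    have hg1 : Int.gcd e phi = 1 := by exact_mod_cast hg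
    rw [hg1] at h1
    have := Nat.le_of_dvd one_pos h1
    omega
  · intro hno
    by_contra hgne
    have hg1 : Int.gcd e phi ≠ 1 := fun h => hgne (by rw [h]; rfl)
    obtain ⟨q, hqprime, hqg⟩ := Nat.exists_prime_and_dvd hg1
    have hqe : (q : Int) ∣ e :=
      dvd_trans (Int.natCast_dvd_natCast.2 hqg) (Int.gcd_dvd_left e phi)
    have hqphi : (q : Int) ∣ phi :=
      dvd_trans (Int.natCast_dvd_natCast.2 hqg) (Int.gcd_dvd_right e phi)
    have hmem : (q : Int) ∈ primesOf phi :=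
      primesOf_complete phi hphi q (Nat.prime_iff_prime_int.mp hqprime)
        (by exact_mod_cast hqprime.pos) hqphi
    exact hno ⟨(q : Int), hmem, by simp [(PySem.Int.mod_eq_zero_iff_dvd e (q : Int)).2 hqe]⟩

theorem loops_eq (phi limit : Int) :
    ∀ es acc, (∀ e ∈ es, 2 ≤ e ∧ e < phi) →
      aLoop phi limit es acc = bLoop limit (primesOf phi) es acc := by
  intro es
  induction es with
  | nil => intro acc _; rfl
  | cons e rest ih =>
    intro acc hmem
    have he := hmem e (by simp)
    have hrest : ∀ x ∈ rest, 2 ≤ x ∧ x < phi := fun x hx => hmem x (by simp [hx])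
    have hc := cond_iff phi e he.1 he.2
    simp only [aLoop, bLoop]
    by_cases hg : pyGcd e phi = 1
    · rw [if_pos hg, if_neg (hc.1 hg)]
      by_cases hlen : ((acc ++ [e]).length : Int) = limit
      · rw [if_pos hlen, if_pos hlen]
      · rw [if_neg hlen, if_neg hlen]
        exact ih (acc ++ [e]) hrest
    · rw [if_neg hg, if_pos (by by_contra hno; exact hg (hc.2 hno))]
      exact ih acc hrest

-- ===== VERDICT (by name: the statement is the Claim_ definition above) =====
theorem possible_e_spec : Claim_equal_possible_e := by
  intro phi limit _
  show possible_e phi limit = possible_e_alt phi limit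
  unfold possible_e possible_e_alt
  apply loops_eq
  intro e he
  have := (PySem.List.mem_pyRange_one).1 he
  exact ⟨this.1, this.2⟩
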